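-- pv_equiv track=rewrite | github.com/vnanda-sjsu/CS123A_CRISPR_Guide_Helper | person2_guide_metrics.py | calculate_self_complementarity
-- ===== SOURCE A (Python) =====
-- def calculate_self_complementarity(seq: str, k: int = 4) -> int:
--     """
--     Counts the number of self-binding k-mer substrings (simple heuristic).
--     If this returns > 0, you can treat that as "yes" for self-complementarity.
--     """
--     seq = seq.upper()
--     count = 0
--     for i in range(len(seq) - 2 * k + 1):
--         sub = seq[i:i + k]
--         if sub in seq[i + k:]:
--             count += 1
--     return count
-- ===== SOURCE B (Python) =====
-- def calculate_self_complementarity(seq: str, k: int = 4) -> int: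
--     """
--     Same count as A, computed in two linear passes: one dict pass recording the
--     LAST start position of each k-mer, then one pass comparing that position to i+k.
--     """
--     seq = seq.upper()
--     n = len(seq)
--     last = {}
--     for p in range(n - k + 1):
--         last[seq[p:p + k]] = p
--     count = 0
--     for i in range(n - 2 * k + 1):
--         if last.get(seq[i:i + k], -1) >= i + k:
--             count += 1
--     return count
-- ===== Notes on version B (the rewrite author's own statement) =====
-- stated objective: alternative
-- what changed: Instead of scanning the whole suffix seq[i+k:] for each i, B builds one dict mapping each k-mer to its last start position and answers each i with a single lookup compared against i+k (O(n k) instead of A's O(n^2 k) worst case; not measurably faster on the repetitive timing inputs, where A's substring search exits early).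
-- outside the precondition, e.g. on calculate_self_complementarity('ABC', -1): A returns 5, B returns 6
import Mathlib
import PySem

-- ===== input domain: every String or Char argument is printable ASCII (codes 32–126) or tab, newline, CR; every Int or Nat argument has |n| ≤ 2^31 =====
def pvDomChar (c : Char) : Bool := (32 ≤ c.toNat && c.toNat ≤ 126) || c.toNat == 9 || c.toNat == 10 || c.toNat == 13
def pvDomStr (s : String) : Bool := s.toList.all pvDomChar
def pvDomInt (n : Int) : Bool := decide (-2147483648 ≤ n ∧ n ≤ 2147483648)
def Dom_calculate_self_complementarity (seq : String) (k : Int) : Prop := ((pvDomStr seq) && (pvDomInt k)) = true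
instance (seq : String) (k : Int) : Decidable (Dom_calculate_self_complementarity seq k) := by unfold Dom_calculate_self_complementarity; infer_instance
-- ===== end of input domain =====

-- B replaces A's per-i scan of the whole suffix seq[i+k:] by one dict of last k-mer
-- start positions plus a lookup per i (objective: alternative algorithm).

-- ===== PORT A =====
def calculate_self_complementarity (seq : String) (k : Int) : Int :=
  let s := PySem.Chars.upper seq.toList
  (PySem.List.pyRange 0 ((s.length : Int) - 2 * k + 1)).foldl
    (fun count i =>
      if PySem.Chars.isIn (PySem.List.slice s (some i) (some (i + k)))
          (PySem.List.slice s (some (i + k)) none)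
      then count + 1 else count) 0

-- ===== PORT B =====
def calculate_self_complementarity_alt (seq : String) (k : Int) : Int :=
  let s := PySem.Chars.upper seq.toList
  let n : Int := s.length
  let last : PySem.Dict (List Char) Int :=
    (PySem.List.pyRange 0 (n - k + 1)).foldl
      (fun d p => d.insert (PySem.List.slice s (some p) (some (p + k))) p)
      PySem.Dict.empty
  (PySem.List.pyRange 0 (n - 2 * k + 1)).foldl
    (fun count i =>
      if i + k ≤ last.getD (PySem.List.slice s (some i) (some (i + k))) (-1)
      then count + 1 else count) 0

-- ===== PRECONDITION & SPEC =====
-- Pre_ excludes non-positive k: a k-mer length k ≤ 0 is outside the function's natural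
-- domain, and A's values there are accidents of Python's negative/empty slice semantics.
def Pre_calculate_self_complementarity (seq : String) (k : Int) : Prop := 1 ≤ k
instance (seq : String) (k : Int) : Decidable (Pre_calculate_self_complementarity seq k) := by unfold Pre_calculate_self_complementarity; infer_instance
def pvWitness_calculate_self_complementarity : String × Int := ("ACGTACGT", 2)
def Spec_calculate_self_complementarity (seq : String) (k : Int) (out : Int) : Prop := out = calculate_self_complementarity_alt seq k
instance (seq : String) (k : Int) (out : Int) : Decidable (Spec_calculate_self_complementarity seq k out) := by unfold Spec_calculate_self_complementarity; infer_instance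

-- ===== CLAIM (what is proved, stated in full; the proofs are below) =====
def Claim_equal_calculate_self_complementarity : Prop := ∀ (seq : String) (k : Int), Dom_calculate_self_complementarity seq k → Pre_calculate_self_complementarity seq k → Spec_calculate_self_complementarity seq k (calculate_self_complementarity seq k)

-- ===== LEMMAS AND PROOFS =====

-- getD of the dict built by "for p: d[f(p)] = p" is a last-match fold over the positions.
theorem pv_getD_foldl_insert (f : Int → List Char) (l : List Int)
    (d : PySem.Dict (List Char) Int) (key : List Char) (v0 : Int) :
    (l.foldl (fun d p => d.insert (f p) p) d).getD key v0
      = l.foldl (fun acc p => if key = f p then p else acc) (d.getD key v0) := by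
  induction l generalizing d with
  | nil => rfl
  | cons a t ih =>
    simp only [List.foldl_cons, ih, PySem.Dict.getD_insert]

-- "last match over range R is ≥ c" says exactly "some position ≥ c matches"
theorem pv_le_lastMatch_iff (g : Nat → List Char) (key : List Char) (R c : Nat) :
    ((c : Int) ≤ (List.range R).foldl (fun acc pn => if key = g pn then (pn : Int) else acc) (-1))
      ↔ ∃ pn : Nat, pn < R ∧ key = g pn ∧ c ≤ pn := by
  induction R with
  | zero =>
    rw [List.range_zero, List.foldl_nil]
    constructor
    · intro h; exfalso; omega
    · rintro ⟨pn, hpn, _⟩; exact absurd hpn (Nat.not_lt_zero pn)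
  | succ R ih =>
    rw [List.range_succ, List.foldl_append, List.foldl_cons, List.foldl_nil]
    by_cases hc : key = g R
    · rw [if_pos hc]
      constructor
      · intro h
        exact ⟨R, Nat.lt_succ_self R, hc, by exact_mod_cast h⟩
      · rintro ⟨pn, hpn, _, hcpn⟩
        have hpR : pn ≤ R := by omega
        exact_mod_cast le_trans hcpn hpR
    · rw [if_neg hc, ih]
      constructor
      · rintro ⟨pn, hpn, h1, h2⟩; exact ⟨pn, by omega, h1, h2⟩
      · rintro ⟨pn, hpn, h1, h2⟩
        refine ⟨pn, ?_, h1, h2⟩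
        rcases Nat.lt_succ_iff_lt_or_eq.mp hpn with h | rfl
        · exact h
        · exact absurd h1 hc

-- occurrence of the k-mer at i anywhere in the suffix = an aligned k-mer start p ≥ i+k
theorem pv_occ_iff (s : List Char) (K : Nat) (hK : 1 ≤ K) (iN : Nat)
    (hi : iN + 2 * K ≤ s.length) :
    (∃ j, List.take K (List.drop iN s) <+: List.drop j (List.drop (iN + K) s))
      ↔ ∃ pn : Nat, pn < s.length + 1 - K
          ∧ List.take K (List.drop iN s) = List.take K (List.drop pn s)
          ∧ iN + K ≤ pn := by
  have hlen : (List.take K (List.drop iN s)).length = K := by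
    rw [List.length_take, List.length_drop]; omega
  constructor
  · rintro ⟨j, hpre⟩
    rw [List.drop_drop] at hpre
    refine ⟨iN + K + j, ?_, ?_, by omega⟩
    · have h2 := hpre.length_le
      rw [hlen, List.length_drop] at h2
      omega
    · have h1 := List.prefix_iff_eq_take.mp hpre
      rwa [hlen] at h1
  · rintro ⟨pn, hpn, h1, h2⟩
    refine ⟨pn - (iN + K), ?_⟩
    rw [List.drop_drop, show iN + K + (pn - (iN + K)) = pn by omega, h1]
    exact List.take_prefix _ _

-- per-index equivalence of A's membership test and B's dict-lookup test
theorem pv_cond_iff (s : List Char) (K : Nat) (hK : 1 ≤ K) (iN : Nat)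
    (hi : iN + 2 * K ≤ s.length) :
    (PySem.Chars.isIn (PySem.List.slice s (some (iN : Int)) (some ((iN : Int) + (K : Int))))
        (PySem.List.slice s (some ((iN : Int) + (K : Int))) none) = true)
      ↔ ((iN : Int) + (K : Int)
          ≤ ((PySem.List.pyRange 0 ((s.length : Int) - (K : Int) + 1)).foldl
              (fun d p => d.insert (PySem.List.slice s (some p) (some (p + (K : Int)))) p)
              PySem.Dict.empty).getD
              (PySem.List.slice s (some (iN : Int)) (some ((iN : Int) + (K : Int)))) (-1)) := by
  have hcast : ((iN : Int) + (K : Int)) = ((iN + K : Nat) : Int) := by push_cast; ring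
  have hrange : ((s.length : Int) - (K : Int) + 1) = ((s.length + 1 - K : Nat) : Int) := by
    push_cast [Nat.cast_sub (by omega : K ≤ s.length + 1)]; ring
  rw [PySem.List.slice_natCast_add s iN K, hcast,
      PySem.List.slice_from s (Int.natCast_nonneg (iN + K)), Int.toNat_natCast,
      ← PySem.Chars.exists_prefix_drop_iff_isIn, hrange, PySem.List.pyRange_zero_natCast,
      pv_getD_foldl_insert (fun p => PySem.List.slice s (some p) (some (p + (K : Int)))),
      PySem.Dict.getD_empty, List.foldl_map]
  simp only [PySem.List.slice_natCast_add]
  rw [pv_occ_iff s K hK iN hi, pv_le_lastMatch_iff]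

-- ===== VERDICT (by name: the statement is the Claim_ definition above) =====
theorem calculate_self_complementarity_spec : Claim_equal_calculate_self_complementarity := by
  intro seq k hdom hpre
  unfold Spec_calculate_self_complementarity
  have hk : 1 ≤ k := hpre
  obtain ⟨K, rfl⟩ : ∃ K : Nat, k = (K : Int) := ⟨k.toNat, (Int.toNat_of_nonneg (by omega)).symm⟩
  have hK : 1 ≤ K := by exact_mod_cast hk
  simp only [calculate_self_complementarity, calculate_self_complementarity_alt]
  refine PySem.List.foldl_congr_mem _ _ _ _ ?_
  intro acc i hi
  obtain ⟨hi0, hi1⟩ := PySem.List.mem_pyRange_one.mp hi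
  obtain ⟨iN, rfl⟩ : ∃ iN : Nat, i = (iN : Int) := ⟨i.toNat, (Int.toNat_of_nonneg hi0).symm⟩
  have hbound : iN + 2 * K ≤ (PySem.Chars.upper seq.toList).length := by omega
  simp only [pv_cond_iff (PySem.Chars.upper seq.toList) K hK iN hbound]
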